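-- pv_equiv track=rewrite | github.com/ramseylab/cerenkov | feature_extraction/genome_browser_tool.py | __bin_from_range_extended
-- ===== SOURCE A (Python) =====
-- binOffsetsExtended = [4096+512+64+8+1, 512+64+8+1, 64+8+1, 8+1, 1, 0]
--
-- _binFirstShift = 17  # How much to shift to get to finest bin.
--
-- _binNextShift = 3  # How much to shift to get to next larger bin.
--
-- _binOffsetOldToExtended = 4681  # From binRange.h
--
-- def __bin_from_range_extended(start, end):
--     """
--     Given start,end in chromosome coordinates, assign it a bin.
--     There's a bin for each 128k segment, for each 1M segment, for each 8M segment, for each 64M segment,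
--     for each 512M segment, and one top level bin for 4Gb.
--
--     Note, since start and end are int's, the practical limit is up to 2Gb-1, and thus,
--     only four result bins on the second level.
--
--     A range goes into the smallest bin it will fit in.
--     """
--
--     start_bin = start
--     end_bin = end-1
--     start_bin >>= _binFirstShift
--     end_bin >>= _binFirstShift
--     for i in range(0, len(binOffsetsExtended)):
--         if start_bin == end_bin:
--             return _binOffsetOldToExtended + binOffsetsExtended[i] + start_bin
--         start_bin >>= _binNextShift
--         end_bin >>= _binNextShift
--
--     raise ValueError("start {}, end {} out of range in findBin (max is 2Gb)".format(start, end))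
-- ===== SOURCE B (Python) =====
-- binOffsetsExtended = [4096+512+64+8+1, 512+64+8+1, 64+8+1, 8+1, 1, 0]
--
-- _binFirstShift = 17
--
-- _binNextShift = 3
--
-- _binOffsetOldToExtended = 4681
--
-- def __bin_from_range_extended(start, end):
--     # Closed form: the bin level is the number of 3-bit shifts needed to make
--     # the two coarse coordinates agree, read off the bit length of their xor.
--     s = start >> _binFirstShift
--     e = (end - 1) >> _binFirstShift
--     x = s ^ e
--     if x >= 0:
--         i = (x.bit_length() + 2) // 3
--         if i <= 5:
--             return _binOffsetOldToExtended + binOffsetsExtended[i] + (s >> (_binNextShift * i))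
--     raise ValueError("start {}, end {} out of range in findBin (max is 2Gb)".format(start, end))
-- ===== Notes on version B (the rewrite author's own statement) =====
-- stated objective: alternative
-- what changed: Replaces the 6-step shift-and-compare loop by a closed form: the bin level is computed directly as (bit_length(s ^ e) + 2) // 3 from the xor of the two coarse coordinates, with a single indexed lookup.
import Mathlib
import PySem

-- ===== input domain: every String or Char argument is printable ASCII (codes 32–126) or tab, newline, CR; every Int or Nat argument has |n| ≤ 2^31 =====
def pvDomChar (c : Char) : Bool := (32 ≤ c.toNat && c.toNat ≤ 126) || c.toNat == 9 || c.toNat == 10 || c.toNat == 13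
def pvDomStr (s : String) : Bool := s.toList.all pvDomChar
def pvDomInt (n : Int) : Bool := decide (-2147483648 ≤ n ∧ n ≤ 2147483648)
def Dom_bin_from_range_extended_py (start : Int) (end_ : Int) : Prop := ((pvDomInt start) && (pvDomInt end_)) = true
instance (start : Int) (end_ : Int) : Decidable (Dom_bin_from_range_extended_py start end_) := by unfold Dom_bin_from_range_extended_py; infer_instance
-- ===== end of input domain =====

-- B replaces A's 6-step shift-and-compare loop by a closed form reading the bin level off bit_length(s ^ e); alternative algorithm, same cost.


-- ===== PORT A =====
def binOffsetsExtended : List Int := [4096+512+64+8+1, 512+64+8+1, 64+8+1, 8+1, 1, 0]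

-- A's 'for i in range(0, len(binOffsetsExtended))' with early return, transliterated as a
-- recursion along the offsets list carrying (start_bin, end_bin); none = the final ValueError.
def binLoopA : List Int → Int → Int → Option Int
  | [], _, _ => none
  | o :: rest, start_bin, end_bin =>
    if start_bin = end_bin then some (4681 + o + start_bin)
    else binLoopA rest (start_bin >>> (3:Nat)) (end_bin >>> (3:Nat))

def bin_from_range_extended_py (start : Int) (end_ : Int) : Int :=
  (binLoopA binOffsetsExtended (start >>> (17:Nat)) ((end_ - 1) >>> (17:Nat))).getD 0  -- none (ValueError) is excluded by Pre_

-- ===== PORT B =====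
def bin_from_range_extended_py_alt (start : Int) (end_ : Int) : Int :=
  let s := start >>> (17:Nat)
  let e := (end_ - 1) >>> (17:Nat)
  let x := PySem.Int.bxor s e
  if 0 ≤ x then
    -- (x.bit_length() + 2) // 3 : x ≥ 0 here, so Nat division is Python's //
    let i : Nat := (PySem.Int.bitLength x + 2) / 3
    if i ≤ 5 then 4681 + PySem.List.pyGetD binOffsetsExtended (i : Int) 0 + (s >>> (3 * i))
    else 0  -- ValueError, excluded by Pre_
  else 0    -- ValueError, excluded by Pre_

-- ===== PRECONDITION & SPEC =====
-- Pre_ excludes exactly the inputs where A raises ValueError: within the |·| ≤ 2^31 domain these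
-- are exactly the ranges whose start and end-1 coarse coordinates have opposite signs.
def Pre_bin_from_range_extended_py (start : Int) (end_ : Int) : Prop := (0 ≤ start ↔ 1 ≤ end_)
instance (start : Int) (end_ : Int) : Decidable (Pre_bin_from_range_extended_py start end_) := by unfold Pre_bin_from_range_extended_py; infer_instance
def pvWitness_bin_from_range_extended_py : Int × Int := (100, 200)

def Spec_bin_from_range_extended_py (start : Int) (end_ : Int) (out : Int) : Prop := out = bin_from_range_extended_py_alt start end_
instance (start : Int) (end_ : Int) (out : Int) : Decidable (Spec_bin_from_range_extended_py start end_ out) := by unfold Spec_bin_from_range_extended_py; infer_instance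

-- ===== CLAIM (what is proved, stated in full; the proofs are below) =====
def Claim_equal_bin_from_range_extended_py : Prop := ∀ (start : Int) (end_ : Int), Dom_bin_from_range_extended_py start end_ → Pre_bin_from_range_extended_py start end_ → Spec_bin_from_range_extended_py start end_ (bin_from_range_extended_py start end_)

-- ===== LEMMAS AND PROOFS =====

lemma intShiftR_add (x : Int) (m n : Nat) : (x >>> m) >>> n = x >>> (m + n) := by
  cases x with
  | ofNat a => exact congrArg Int.ofNat (Nat.shiftRight_add a m n).symm
  | negSucc a => exact congrArg Int.negSucc (Nat.shiftRight_add a m n).symm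

lemma natXor_shiftRight (a b k : Nat) : (a ^^^ b) >>> k = (a >>> k) ^^^ (b >>> k) := by
  apply Nat.eq_of_testBit_eq; intro i
  simp [Nat.testBit_shiftRight, Nat.testBit_xor]

lemma blNat_le_iff (c k : Nat) : PySem.Int.bitLength (c : Int) ≤ k ↔ c < 2 ^ k := by
  constructor
  · intro h
    have h1 := PySem.Int.lt_two_pow_bitLength (c : Int)
    simp only [Int.natAbs_natCast] at h1
    exact lt_of_lt_of_le h1 (Nat.pow_le_pow_right (by norm_num) h)
  · intro h
    by_contra hlt
    rcases Nat.eq_zero_or_pos c with hc | hc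
    · subst hc; simp [PySem.Int.bitLength_zero] at hlt
    · have h2 := PySem.Int.two_pow_bitLength_le (c : Int) (by exact_mod_cast hc.ne')
      simp only [Int.natAbs_natCast] at h2
      have : 2 ^ k ≤ 2 ^ (PySem.Int.bitLength (c : Int) - 1) :=
        Nat.pow_le_pow_right (by norm_num) (by omega)
      omega

lemma cond_iff (a b k : Nat) : a >>> k = b >>> k ↔ PySem.Int.bitLength ((a ^^^ b : Nat) : Int) ≤ k := by
  rw [blNat_le_iff, ← Nat.xor_eq_zero_iff (x := a >>> k) (y := b >>> k), ← natXor_shiftRight,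
    Nat.shiftRight_eq_div_pow, Nat.div_eq_zero_iff]
  have hpow : 0 < 2 ^ k := Nat.two_pow_pos k
  omega

lemma main_loop (s e : Int) (c : Nat)
    (hsh : ∀ k : Nat, s >>> k = e >>> k ↔ PySem.Int.bitLength (c : Int) ≤ k)
    (h15 : PySem.Int.bitLength (c : Int) ≤ 15) :
    (binLoopA binOffsetsExtended s e).getD 0
      = 4681 + binOffsetsExtended.getD ((PySem.Int.bitLength (c : Int) + 2) / 3) 0
          + (s >>> (3 * ((PySem.Int.bitLength (c : Int) + 2) / 3))) := by
  have h0 : (s = e) ↔ PySem.Int.bitLength (c : Int) ≤ 0 := by simpa using hsh 0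
  have h1 : (s >>> (3:Nat) = e >>> (3:Nat)) ↔ PySem.Int.bitLength (c : Int) ≤ 3 := hsh 3
  have h2 : (s >>> (3:Nat) >>> (3:Nat) = e >>> (3:Nat) >>> (3:Nat)) ↔ PySem.Int.bitLength (c : Int) ≤ 6 := by
    simpa [intShiftR_add] using hsh 6
  have h3 : (s >>> (3:Nat) >>> (3:Nat) >>> (3:Nat) = e >>> (3:Nat) >>> (3:Nat) >>> (3:Nat)) ↔ PySem.Int.bitLength (c : Int) ≤ 9 := by
    simpa [intShiftR_add] using hsh 9
  have h4 : (s >>> (3:Nat) >>> (3:Nat) >>> (3:Nat) >>> (3:Nat) = e >>> (3:Nat) >>> (3:Nat) >>> (3:Nat) >>> (3:Nat)) ↔ PySem.Int.bitLength (c : Int) ≤ 12 := by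
    simpa [intShiftR_add] using hsh 12
  have h5 : (s >>> (3:Nat) >>> (3:Nat) >>> (3:Nat) >>> (3:Nat) >>> (3:Nat) = e >>> (3:Nat) >>> (3:Nat) >>> (3:Nat) >>> (3:Nat) >>> (3:Nat)) ↔ PySem.Int.bitLength (c : Int) ≤ 15 := by
    simpa [intShiftR_add] using hsh 15
  set n := PySem.Int.bitLength (c : Int) with hn
  simp only [binLoopA, binOffsetsExtended, h0, h1, h2, h3, h4, h5]
  interval_cases n <;> norm_num [intShiftR_add, List.getD]

theorem pv_bridge (start end_ : Int) (c : Nat)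
    (hx : PySem.Int.bxor (start >>> (17:Nat)) ((end_ - 1) >>> (17:Nat)) = (c : Int))
    (hsh : ∀ k : Nat, (start >>> (17:Nat)) >>> k = ((end_ - 1) >>> (17:Nat)) >>> k ↔ PySem.Int.bitLength (c : Int) ≤ k)
    (h15 : PySem.Int.bitLength (c : Int) ≤ 15) :
    bin_from_range_extended_py start end_ = bin_from_range_extended_py_alt start end_ := by
  show (binLoopA binOffsetsExtended (start >>> (17:Nat)) ((end_ - 1) >>> (17:Nat))).getD 0 =
    (if 0 ≤ PySem.Int.bxor (start >>> (17:Nat)) ((end_ - 1) >>> (17:Nat)) then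
      (if (PySem.Int.bitLength (PySem.Int.bxor (start >>> (17:Nat)) ((end_ - 1) >>> (17:Nat))) + 2) / 3 ≤ 5 then
        4681 + PySem.List.pyGetD binOffsetsExtended
            (((PySem.Int.bitLength (PySem.Int.bxor (start >>> (17:Nat)) ((end_ - 1) >>> (17:Nat))) + 2) / 3 : Nat) : Int) 0
          + ((start >>> (17:Nat)) >>> (3 * ((PySem.Int.bitLength (PySem.Int.bxor (start >>> (17:Nat)) ((end_ - 1) >>> (17:Nat))) + 2) / 3)))
      else 0)
    else 0)
  rw [hx]
  have hpos : (0 : Int) ≤ (c : Int) := Int.natCast_nonneg c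
  have hi : (PySem.Int.bitLength (c : Int) + 2) / 3 ≤ 5 := by omega
  simp only [hpos, if_true, hi, PySem.List.pyGetD_natCast]
  exact main_loop _ _ c hsh h15

lemma bxor_negSucc (a b : Nat) :
    PySem.Int.bxor (Int.negSucc a) (Int.negSucc b) = ((a ^^^ b : Nat) : Int) := by
  have hneg : ¬ (0 : Int) ≤ Int.negSucc a := by
    rw [Int.negSucc_eq]; omega
  have hneg' : ¬ (0 : Int) ≤ Int.negSucc b := by
    rw [Int.negSucc_eq]; omega
  have e1 : (-(Int.negSucc a) - 1) = (a : Int) := by rw [Int.negSucc_eq]; ring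
  have e2 : (-(Int.negSucc b) - 1) = (b : Int) := by rw [Int.negSucc_eq]; ring
  simp only [PySem.Int.bxor, hneg, hneg', if_false, e1, e2, Int.toNat_natCast]

lemma negSucc_shiftRight (a k : Nat) : (Int.negSucc a) >>> k = Int.negSucc (a >>> k) := rfl

lemma toNat_shift_lt (t : Nat) (ht : t ≤ 2147483648) : t >>> (17:Nat) < 32768 := by
  rw [Nat.shiftRight_eq_div_pow, show (2:Nat) ^ 17 = 131072 from by norm_num]
  omega

-- ===== VERDICT (by name: the statement is the Claim_ definition above) =====
theorem bin_from_range_extended_py_spec : Claim_equal_bin_from_range_extended_py := by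
  intro start end_ hdom hpre
  unfold Spec_bin_from_range_extended_py
  unfold Dom_bin_from_range_extended_py pvDomInt at hdom
  simp only [Bool.and_eq_true, decide_eq_true_eq] at hdom
  obtain ⟨⟨hs1, hs2⟩, he1, he2⟩ := hdom
  unfold Pre_bin_from_range_extended_py at hpre
  by_cases hs0 : 0 ≤ start
  · -- both coarse coordinates nonnegative
    have he0 : 1 ≤ end_ := hpre.mp hs0
    have hsa : start >>> (17:Nat) = ((start.toNat >>> (17:Nat) : Nat) : Int) := by
      conv_lhs => rw [← Int.toNat_of_nonneg hs0]
      rw [← Int.natCast_shiftRight]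
    have heb : (end_ - 1) >>> (17:Nat) = (((end_ - 1).toNat >>> (17:Nat) : Nat) : Int) := by
      conv_lhs => rw [← Int.toNat_of_nonneg (show (0:Int) ≤ end_ - 1 by omega)]
      rw [← Int.natCast_shiftRight]
    set a := start.toNat >>> (17:Nat) with ha
    set b := (end_ - 1).toNat >>> (17:Nat) with hb
    have hA : a < 32768 := toNat_shift_lt _ (by omega)
    have hB : b < 32768 := toNat_shift_lt _ (by omega)
    have hc : a ^^^ b < 32768 := by
      have := Nat.xor_lt_two_pow (n := 15) (x := a) (y := b) (by norm_num; omega) (by norm_num; omega)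
      norm_num at this; omega
    apply pv_bridge start end_ (a ^^^ b)
    · rw [hsa, heb]; exact PySem.Int.bxor_natCast a b
    · intro k
      rw [hsa, heb, ← Int.natCast_shiftRight, ← Int.natCast_shiftRight, Nat.cast_inj]
      exact cond_iff a b k
    · exact (blNat_le_iff _ _).mpr (by norm_num; omega)
  · -- both coarse coordinates negative
    have he0 : end_ ≤ 0 := by
      by_contra h
      exact hs0 (hpre.mpr (by omega))
    have hm : ((-start - 1).toNat : Int) = -start - 1 := Int.toNat_of_nonneg (by omega)
    have hp : ((-end_).toNat : Int) = -end_ := Int.toNat_of_nonneg (by omega)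
    have hstart : start = Int.negSucc (-start - 1).toNat := by rw [Int.negSucc_eq]; omega
    have hend : end_ - 1 = Int.negSucc (-end_).toNat := by rw [Int.negSucc_eq]; omega
    have hsa : start >>> (17:Nat) = Int.negSucc ((-start - 1).toNat >>> (17:Nat)) := by
      conv_lhs => rw [hstart]
      exact negSucc_shiftRight _ _
    have heb : (end_ - 1) >>> (17:Nat) = Int.negSucc ((-end_).toNat >>> (17:Nat)) := by
      conv_lhs => rw [hend]
      exact negSucc_shiftRight _ _
    set a := (-start - 1).toNat >>> (17:Nat) with ha
    set b := (-end_).toNat >>> (17:Nat) with hb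
    have hA : a < 32768 := toNat_shift_lt _ (by omega)
    have hB : b < 32768 := toNat_shift_lt _ (by omega)
    have hc : a ^^^ b < 32768 := by
      have := Nat.xor_lt_two_pow (n := 15) (x := a) (y := b) (by norm_num; omega) (by norm_num; omega)
      norm_num at this; omega
    apply pv_bridge start end_ (a ^^^ b)
    · rw [hsa, heb]; exact bxor_negSucc a b
    · intro k
      rw [hsa, heb, negSucc_shiftRight, negSucc_shiftRight]
      rw [show ∀ x y : Nat, (Int.negSucc x = Int.negSucc y) = (x = y) from fun x y => by simp]
      exact cond_iff a b k
    · exact (blNat_le_iff _ _).mpr (by norm_num; omega)
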